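-- pv_equiv track=rewrite | github.com/TechxGenus/CursorCore | generic/utils.py | unique_changes
-- ===== SOURCE A (Python) =====
-- def unique_changes(changes_lines, lines1):
--     """
--     Identifies unique changes in a list of changes and expands them based on the context of the original lines.
--
--     Args:
--         changes_lines (list of tuples): A list of tuples where each tuple contains two sub-tuples.
--             The first sub-tuple represents the old change with start and end indices,
--             and the second sub-tuple represents the new change with start and end indices.
--         lines1 (list): A list of lines from the original content.
--
--     Returns:
--         list of tuples: A list of tuples where each tuple contains two sub-tuples.
--             The first sub-tuple represents the expanded old change with updated start and end indices,
--             and the second sub-tuple represents the expanded new change with updated start and end indices.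
--
--     Raises:
--         AssertionError: If the left or right expansion values are negative, indicating an invalid expansion.
--     """
--     unique_changes_lines = []
--     if len(changes_lines) == 0:
--         return unique_changes_lines
--     for old_change, new_change in changes_lines:
--         left_expansion, right_expansion = find_unique_sublist(lines1, old_change[0], old_change[1])
--         assert left_expansion >= 0 and right_expansion >= 0, "Invalid expansion"
--         unique_changes_lines.append(((old_change[0] - left_expansion, old_change[1] + right_expansion), (new_change[0] - left_expansion, new_change[1] + right_expansion)))
--     return unique_changes_lines
--
-- def find_unique_sublist(b, a1, a2):
--     """
--     Finds the smallest extension of the sublist `b[a1:a2]` that is unique within the list `b`.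
--
--     Args:
--         b (list): The list in which to find the unique sublist.
--         a1 (int): The starting index of the sublist.
--         a2 (int): The ending index of the sublist.
--
--     Returns:
--         tuple: A tuple (x, y) where `x` is the minimum number of elements to extend the sublist
--                at the beginning, and `y` is the minimum number of elements to extend the sublist
--                at the end to make it unique within `b`. If no unique sublist is found, returns (-1, -1).
--     """
--     if not "\n".join(b).strip():
--         return 0, 0
--
--     def is_unique_sublist(b, sublist):
--         """
--         Check if a sublist appears exactly once in a list.
--
--         Args:
--             b (list): The main list in which to search for the sublist.
--             sublist (list): The sublist to search for within the main list.
--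
--         Returns:
--             bool: True if the sublist appears exactly once in the main list, False otherwise.
--
--         Raises:
--             AssertionError: If the sublist appears more than once in the main list.
--         """
--         if not "\n".join(sublist).strip():
--             return False
--         count = 0
--         for i in range(len(b) - len(sublist) + 1):
--             if b[i:i + len(sublist)] == sublist:
--                 count += 1
--             if count > 1:
--                 return False
--         assert count == 1, "Invalid count"
--         return count == 1
--
--     for extend_length in range(len(b) - a2 + a1 + 1):
--         for window in range(extend_length + 1):
--             current_sublist = b[a1 - extend_length + window:a2 + window]
--             if is_unique_sublist(b, current_sublist):
--                 return min(a1, extend_length - window), min(len(b) - a2, window)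
--     return -1, -1
-- ===== SOURCE B (Python) =====
-- def unique_changes(changes_lines, lines1):
--     cache = {}
--     result = []
--     for old_change, new_change in changes_lines:
--         key = (old_change[0], old_change[1])
--         if key in cache:
--             l, r = cache[key]
--         else:
--             l, r = _min_unique_expansion(lines1, key[0], key[1])
--             cache[key] = (l, r)
--         result.append(((old_change[0] - l, old_change[1] + r),
--                        (new_change[0] - l, new_change[1] + r)))
--     return result
--
-- def _occurs_once(b, sub):
--     if not "\n".join(sub).strip():
--         return False
--     m = len(sub)
--     last = len(b) - m
--     first = None
--     for i in range(last + 1):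
--         if b[i:i + m] == sub:
--             first = i
--             break
--     if first is None:
--         return False
--     for i in range(first + 1, last + 1):
--         if b[i:i + m] == sub:
--             return False
--     return True
--
-- def _min_unique_expansion(b, a1, a2):
--     if not "\n".join(b).strip():
--         return (0, 0)
--     n = len(b)
--     e_max = n - a2 + a1
--     best = None  # cell (l, w) minimizing (l + w, w) lexicographically
--     for w in range(e_max + 1):
--         cap = e_max - w
--         if best is not None:
--             cap = min(cap, best[0] + best[1] - w - 1)
--         hit = None
--         for l in range(cap + 1):
--             if _occurs_once(b, b[a1 - l:a2 + w]):
--                 hit = l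
--                 break
--         if hit is not None:
--             best = (hit, w)
--     if best is None:
--         return (-1, -1)
--     return (min(a1, best[0]), min(n - a2, best[1]))
-- ===== Notes on version B (the rewrite author's own statement) =====
-- stated objective: alternative
-- what changed: A returns at the first (extend_length, window) pair of a diagonal double loop whose slice is unique; B instead scans per window offset, finding each row's first unique left-extension under a best-so-far cutoff and keeping the lexicographically-least (total, window) cell, memoizes the expansion per distinct old_change in a dict, and tests uniqueness by locating the first match position and then checking no second one exists instead of A's capped counting loop.
import Mathlib
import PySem

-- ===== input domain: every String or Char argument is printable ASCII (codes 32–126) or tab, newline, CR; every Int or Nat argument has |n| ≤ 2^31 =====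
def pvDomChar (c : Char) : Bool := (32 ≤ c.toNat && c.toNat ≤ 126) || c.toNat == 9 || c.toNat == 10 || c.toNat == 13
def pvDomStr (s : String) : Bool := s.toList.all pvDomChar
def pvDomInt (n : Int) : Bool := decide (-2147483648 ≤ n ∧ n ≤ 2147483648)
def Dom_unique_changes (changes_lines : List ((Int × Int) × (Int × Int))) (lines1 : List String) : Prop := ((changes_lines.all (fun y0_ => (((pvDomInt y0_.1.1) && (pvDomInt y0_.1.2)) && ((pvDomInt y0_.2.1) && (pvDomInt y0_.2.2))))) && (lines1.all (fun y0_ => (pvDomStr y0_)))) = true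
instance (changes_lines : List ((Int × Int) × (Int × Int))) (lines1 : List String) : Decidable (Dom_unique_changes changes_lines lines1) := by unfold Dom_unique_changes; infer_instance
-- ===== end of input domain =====

-- B replaces A's diagonal first-return double loop (first (extend,window) in lexicographic
-- order whose window is unique) by a per-row scan that keeps the best cell found so far with a
-- cutoff, plus a cache for repeated old-change keys; same return value, proved equal.

-- shared by both ports and Pre_: Python's `not "\n".join(xs).strip()`
def pvBlank (xs : List String) : Bool := PySem.Str.len (PySem.Str.strip (PySem.Str.join "\n" xs)) == 0

-- ===== PORT A =====
-- inner counting loop of is_unique_sublist; early exit at count > 1.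
-- (Python's `assert count == 1` can only fail for count = 0, which is unreachable from
-- unique_changes: the probed sublist is always a slice of b, hence occurs at least once when
-- non-blank; the port simply returns `count == 1`, which is what Python returns whenever it returns.)
def pvCountLoopA (b sub : List String) (i : Int) (count : Nat) : Nat → Bool
  | 0 => count == 1
  | fuel+1 =>
      let count' := if PySem.List.slice b (some i) (some (i + PySem.List.len sub)) == sub then count + 1 else count
      if count' > 1 then false else pvCountLoopA b sub (i+1) count' fuel

def pvIsUniqueA (b sub : List String) : Bool :=
  if pvBlank sub then false
  else pvCountLoopA b sub 0 0 ((PySem.List.len b - PySem.List.len sub + 1).toNat)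

-- `for window in range(extend_length + 1)` with first-return
def pvWinLoopA (b : List String) (a1 a2 e w : Int) : Nat → Option (Int × Int)
  | 0 => none
  | fuel+1 =>
      if pvIsUniqueA b (PySem.List.slice b (some (a1 - e + w)) (some (a2 + w)))
      then some (min a1 (e - w), min (PySem.List.len b - a2) w)
      else pvWinLoopA b a1 a2 e (w+1) fuel

-- `for extend_length in range(len(b) - a2 + a1 + 1)`
def pvExtLoopA (b : List String) (a1 a2 e : Int) : Nat → Option (Int × Int)
  | 0 => none
  | fuel+1 =>
      match pvWinLoopA b a1 a2 e 0 (e + 1).toNat with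
      | some r => some r
      | none => pvExtLoopA b a1 a2 (e+1) fuel

def pvFindUniqueA (b : List String) (a1 a2 : Int) : Int × Int :=
  if pvBlank b then (0, 0)
  else (pvExtLoopA b a1 a2 0 (PySem.List.len b - a2 + a1 + 1).toNat).getD (-1, -1)

-- the `for old_change, new_change in changes_lines: ... append(...)` loop (the `len == 0`
-- early return is the same empty list).  Python's `assert left/right >= 0` raises exactly on
-- the inputs Pre_ excludes; the port proceeds with the computed values there.
def unique_changes (changes_lines : List ((Int × Int) × (Int × Int))) (lines1 : List String) : List ((Int × Int) × (Int × Int)) :=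
  changes_lines.foldl (fun acc c =>
    let lr := pvFindUniqueA lines1 c.1.1 c.1.2
    acc ++ [((c.1.1 - lr.1, c.1.2 + lr.2), (c.2.1 - lr.1, c.2.2 + lr.2))]) []

-- ===== PORT B =====
-- _occurs_once: find the first match position, then check that no second one exists
def pvFirstHitB (b sub : List String) (i : Int) : Nat → Option Int
  | 0 => none
  | fuel+1 =>
      if PySem.List.slice b (some i) (some (i + PySem.List.len sub)) == sub
      then some i else pvFirstHitB b sub (i+1) fuel

def pvNoSecondB (b sub : List String) (i : Int) : Nat → Bool
  | 0 => true
  | fuel+1 =>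
      if PySem.List.slice b (some i) (some (i + PySem.List.len sub)) == sub
      then false else pvNoSecondB b sub (i+1) fuel

def pvOccursOnceB (b sub : List String) : Bool :=
  if pvBlank sub then false
  else
    let last := PySem.List.len b - PySem.List.len sub
    match pvFirstHitB b sub 0 (last + 1).toNat with
    | none => false
    | some first => pvNoSecondB b sub (first + 1) (last - first).toNat

-- inner `for l in range(cap + 1): if _occurs_once(...): hit = l; break`
def pvRowScanB (b : List String) (a1 a2 w l : Int) : Nat → Option Int
  | 0 => none
  | fuel+1 =>
      if pvOccursOnceB b (PySem.List.slice b (some (a1 - l)) (some (a2 + w)))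
      then some l else pvRowScanB b a1 a2 w (l+1) fuel

-- outer `for w in range(e_max + 1)` keeping `best`
def pvRowsB (b : List String) (a1 a2 eMax w : Int) (best : Option (Int × Int)) : Nat → Option (Int × Int)
  | 0 => best
  | fuel+1 =>
      let cap : Int := match best with
        | none => eMax - w
        | some q => min (eMax - w) (q.1 + q.2 - w - 1)
      let best' := match pvRowScanB b a1 a2 w 0 (cap + 1).toNat with
        | some l => some (l, w)
        | none => best
      pvRowsB b a1 a2 eMax (w+1) best' fuel

def pvMinUniqueExpB (b : List String) (a1 a2 : Int) : Int × Int :=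
  if pvBlank b then (0, 0)
  else
    let n := PySem.List.len b
    match pvRowsB b a1 a2 (n - a2 + a1) 0 none ((n - a2 + a1) + 1).toNat with
    | none => (-1, -1)
    | some q => (min a1 q.1, min (n - a2) q.2)

-- main loop with the memo dict `cache`
def unique_changes_alt (changes_lines : List ((Int × Int) × (Int × Int))) (lines1 : List String) : List ((Int × Int) × (Int × Int)) :=
  (changes_lines.foldl (fun st c =>
     let key := (c.1.1, c.1.2)
     let lr := match PySem.Dict.get? st.1 key with
       | some v => v
       | none => pvMinUniqueExpB lines1 key.1 key.2
     let cache := match PySem.Dict.get? st.1 key with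
       | some _ => st.1
       | none => PySem.Dict.insert st.1 key lr
     (cache, st.2 ++ [((c.1.1 - lr.1, c.1.2 + lr.2), (c.2.1 - lr.1, c.2.2 + lr.2))]))
    ((PySem.Dict.empty : PySem.Dict (Int × Int) (Int × Int)), [])).2

-- ===== PRECONDITION & SPEC =====
-- Pre_ is exactly the inputs on which the Python A returns: A raises AssertionError precisely
-- when lines1 is not whitespace-blank and some change has old start < 0 or old end > len(lines1)
-- (the minimal expansion found then has a negative component, or no window succeeds at all).
def Pre_unique_changes (changes_lines : List ((Int × Int) × (Int × Int))) (lines1 : List String) : Prop :=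
  pvBlank lines1 = true ∨ ∀ c ∈ changes_lines, 0 ≤ c.1.1 ∧ c.1.2 ≤ (lines1.length : Int)
instance (changes_lines : List ((Int × Int) × (Int × Int))) (lines1 : List String) : Decidable (Pre_unique_changes changes_lines lines1) := by unfold Pre_unique_changes; infer_instance

def pvWitness_unique_changes : (List ((Int × Int) × (Int × Int))) × List String :=
  ([((1, 2), (1, 1))], ["a", "b", "a", "c"])

def Spec_unique_changes (changes_lines : List ((Int × Int) × (Int × Int))) (lines1 : List String) (out : List ((Int × Int) × (Int × Int))) : Prop := out = unique_changes_alt changes_lines lines1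
instance (changes_lines : List ((Int × Int) × (Int × Int))) (lines1 : List String) (out : List ((Int × Int) × (Int × Int))) : Decidable (Spec_unique_changes changes_lines lines1 out) := by unfold Spec_unique_changes; infer_instance

-- ===== CLAIM (what is proved, stated in full; the proofs are below) =====
def Claim_equal_unique_changes : Prop := ∀ (changes_lines : List ((Int × Int) × (Int × Int))) (lines1 : List String), Dom_unique_changes changes_lines lines1 → Pre_unique_changes changes_lines lines1 → Spec_unique_changes changes_lines lines1 (unique_changes changes_lines lines1)

-- ===== LEMMAS AND PROOFS =====

-- abbreviations used only by the proofs
def pvP (b sub : List String) (i : Int) : Bool :=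
  PySem.List.slice b (some i) (some (i + PySem.List.len sub)) == sub

-- the per-cell uniqueness test both ports share, written on the raw cell (l, w)
def pvQ (b : List String) (a1 a2 l w : Int) : Bool :=
  pvIsUniqueA b (PySem.List.slice b (some (a1 - l)) (some (a2 + w)))

def pvV (b : List String) (a1 a2 : Int) (c : Int × Int) : Int × Int :=
  (min a1 c.1, min (PySem.List.len b - a2) c.2)

-- cell-valued mirror of A's inner loops (proof-side only)
def pvCellW (b : List String) (a1 a2 e w : Int) : Nat → Option (Int × Int)
  | 0 => none
  | fuel+1 =>
      if pvQ b a1 a2 (e - w) w then some (e - w, w) else pvCellW b a1 a2 e (w+1) fuel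

def pvCellE (b : List String) (a1 a2 e : Int) : Nat → Option (Int × Int)
  | 0 => none
  | fuel+1 =>
      match pvCellW b a1 a2 e 0 (e + 1).toNat with
      | some c => some c
      | none => pvCellE b a1 a2 (e+1) fuel

-- lexicographic order on (sum, w)
def pvKeyLe (c d : Int × Int) : Prop :=
  c.1 + c.2 < d.1 + d.2 ∨ (c.1 + c.2 = d.1 + d.2 ∧ c.2 ≤ d.2)

-- ---- U: the two uniqueness tests agree ----
-- number of match positions in the window [i, i+fuel) (proof-side spec)
def pvCountIn (b sub : List String) (i : Int) : Nat → Nat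
  | 0 => 0
  | fuel+1 => (if pvP b sub i then 1 else 0) + pvCountIn b sub (i+1) fuel

theorem pvCountLoopA_eq (b sub : List String) :
    ∀ (fuel : Nat) (i : Int) (c : Nat), c ≤ 1 →
      pvCountLoopA b sub i c fuel = ((c + pvCountIn b sub i fuel) == 1) := by
  intro fuel
  induction fuel with
  | zero => intro i c hc; simp [pvCountLoopA, pvCountIn]
  | succ f ih =>
      intro i c hc
      simp only [pvCountLoopA, pvCountIn]
      rw [show (PySem.List.slice b (some i) (some (i + PySem.List.len sub)) == sub) = pvP b sub i from rfl]
      cases hP : pvP b sub i with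
      | true =>
          simp only [if_true]
          rcases (by omega : c = 0 ∨ c = 1) with hc0 | hc1
          · subst hc0
            simp only [if_neg (by omega : ¬ (0 + 1 > 1))]
            rw [ih (i + 1) 1 (by omega)]
            congr 1
            omega
          · subst hc1
            simp
      | false =>
          simp only [Bool.false_eq_true, if_false]
          simp only [if_neg (by omega : ¬ c > 1)]
          rw [ih (i + 1) c hc]
          congr 1
          omega

theorem pvFirstHitB_spec (b sub : List String) :
    ∀ (fuel : Nat) (i : Int),
      (pvFirstHitB b sub i fuel = none → pvCountIn b sub i fuel = 0) ∧
      (∀ j, pvFirstHitB b sub i fuel = some j →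
        ∃ g : Nat, g < fuel ∧ j = i + g ∧
          pvCountIn b sub i fuel = 1 + pvCountIn b sub (j + 1) (fuel - g - 1)) := by
  intro fuel
  induction fuel with
  | zero =>
      intro i
      exact ⟨fun _ => rfl, fun j h => by simp [pvFirstHitB] at h⟩
  | succ f ih =>
      intro i
      simp only [pvFirstHitB, pvCountIn]
      rw [show (PySem.List.slice b (some i) (some (i + PySem.List.len sub)) == sub) = pvP b sub i from rfl]
      cases hP : pvP b sub i with
      | true =>
          simp only [if_true]
          constructor
          · intro h; exact absurd h (by simp)
          · intro j h
            have hj : i = j := by simpa using h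
            subst hj
            exact ⟨0, by omega, by omega, by simp⟩
      | false =>
          simp only [Bool.false_eq_true, if_false]
          constructor
          · intro h; simpa using (ih (i + 1)).1 h
          · intro j h
            obtain ⟨g, hg, hj, hcnt⟩ := (ih (i + 1)).2 j h
            refine ⟨g + 1, by omega, by omega, ?_⟩
            simpa [show f + 1 - (g + 1) - 1 = f - g - 1 from by omega] using hcnt

theorem pvNoSecondB_eq (b sub : List String) :
    ∀ (fuel : Nat) (i : Int), pvNoSecondB b sub i fuel = (pvCountIn b sub i fuel == 0) := by
  intro fuel
  induction fuel with
  | zero => intro i; simp [pvNoSecondB, pvCountIn]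
  | succ f ih =>
      intro i
      simp only [pvNoSecondB, pvCountIn]
      rw [show (PySem.List.slice b (some i) (some (i + PySem.List.len sub)) == sub) = pvP b sub i from rfl]
      cases hP : pvP b sub i with
      | true => simp
      | false =>
          simp only [Bool.false_eq_true, if_false]
          rw [ih (i + 1)]
          congr 1
          omega

theorem pvUnique_eq (b sub : List String) : pvIsUniqueA b sub = pvOccursOnceB b sub := by
  rw [pvIsUniqueA, pvOccursOnceB]
  cases hbl : pvBlank sub with
  | true => simp
  | false =>
      simp only [Bool.false_eq_true, if_false]
      rw [show PySem.List.len b - PySem.List.len sub + 1 = (PySem.List.len b - PySem.List.len sub) + 1 from rfl]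
      set last := PySem.List.len b - PySem.List.len sub with hlast
      rw [pvCountLoopA_eq b sub ((last + 1).toNat) 0 0 (by omega)]
      obtain ⟨hnone, hsome⟩ := pvFirstHitB_spec b sub ((last + 1).toNat) 0
      cases hF : pvFirstHitB b sub 0 ((last + 1).toNat) with
      | none => rw [hnone hF]; simp
      | some j =>
          obtain ⟨g, hg, hj, hcnt⟩ := hsome j hF
          rw [hcnt]
          simp only [pvNoSecondB_eq]
          rw [show (last - j).toNat = (last + 1).toNat - g - 1 from by omega]
          cases pvCountIn b sub (j + 1) ((last + 1).toNat - g - 1) with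
          | zero => simp
          | succ k => simp

-- ---- A's loops compute the cell, then clamp ----
theorem pvWinLoopA_eq (b : List String) (a1 a2 e : Int) :
    ∀ (fuel : Nat) (w : Int), pvWinLoopA b a1 a2 e w fuel = Option.map (pvV b a1 a2) (pvCellW b a1 a2 e w fuel) := by
  intro fuel
  induction fuel with
  | zero => intro w; simp [pvWinLoopA, pvCellW]
  | succ f ih =>
      intro w
      have harg : a1 - e + w = a1 - (e - w) := by ring
      simp only [pvWinLoopA, pvCellW, pvQ, harg]
      split
      · simp [pvV]
      · exact ih (w + 1)

theorem pvExtLoopA_eq (b : List String) (a1 a2 : Int) :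
    ∀ (fuel : Nat) (e : Int), pvExtLoopA b a1 a2 e fuel = Option.map (pvV b a1 a2) (pvCellE b a1 a2 e fuel) := by
  intro fuel
  induction fuel with
  | zero => intro e; simp [pvExtLoopA, pvCellE]
  | succ f ih =>
      intro e
      simp only [pvExtLoopA, pvCellE, pvWinLoopA_eq b a1 a2 e ((e + 1).toNat) 0]
      cases pvCellW b a1 a2 e 0 ((e + 1).toNat) with
      | none => simpa using ih (e + 1)
      | some c => simp

-- ---- characterization of A's diagonal-first search ----
def pvHit (b : List String) (a1 a2 E l w : Int) : Prop :=
  0 ≤ l ∧ 0 ≤ w ∧ l + w ≤ E ∧ pvQ b a1 a2 l w = true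

theorem pvCellW_char (b : List String) (a1 a2 e : Int) :
    ∀ (fuel : Nat) (w0 : Int),
      ((pvCellW b a1 a2 e w0 fuel = none ↔ ∀ w, w0 ≤ w → w < w0 + fuel → ¬ pvQ b a1 a2 (e - w) w = true) ∧
       (∀ c, pvCellW b a1 a2 e w0 fuel = some c →
          ∃ w, w0 ≤ w ∧ w < w0 + fuel ∧ c = (e - w, w) ∧ pvQ b a1 a2 (e - w) w = true ∧
            ∀ w', w0 ≤ w' → w' < w → ¬ pvQ b a1 a2 (e - w') w' = true)) := by
  intro fuel
  induction fuel with
  | zero =>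
      intro w0
      constructor
      · simp [pvCellW]; omega
      · intro c h; simp [pvCellW] at h
  | succ f ih =>
      intro w0
      constructor
      · simp only [pvCellW]
        split
        · rename_i hq
          constructor
          · intro h; exact absurd h (by simp)
          · intro h; exact absurd hq (h w0 le_rfl (by omega))
        · rename_i hq
          rw [(ih (w0 + 1)).1]
          constructor
          · intro h w hw1 hw2
            rcases eq_or_lt_of_le hw1 with he | hlt
            · subst he; simpa using hq
            · exact h w (by omega) (by omega)
          · intro h w hw1 hw2; exact h w (by omega) (by omega)
      · intro c
        simp only [pvCellW]
        split
        · rename_i hq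
          intro h
          refine ⟨w0, le_rfl, by omega, by simpa using h.symm, hq, by omega⟩
        · rename_i hq
          intro h
          obtain ⟨w, hw1, hw2, hc, hQ, hmin⟩ := (ih (w0 + 1)).2 c h
          refine ⟨w, by omega, by omega, hc, hQ, ?_⟩
          intro w' hw1' hw2'
          rcases eq_or_lt_of_le hw1' with he | hlt
          · subst he; simpa using hq
          · exact hmin w' (by omega) hw2'

theorem pvCellE_char (b : List String) (a1 a2 : Int) :
    ∀ (fuel : Nat) (e : Int), 0 ≤ e →
      ((pvCellE b a1 a2 e fuel = none ↔
          ∀ l w, 0 ≤ l → 0 ≤ w → e ≤ l + w → l + w < e + fuel → ¬ pvQ b a1 a2 l w = true) ∧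
       (∀ c, pvCellE b a1 a2 e fuel = some c →
          (0 ≤ c.1 ∧ 0 ≤ c.2 ∧ e ≤ c.1 + c.2 ∧ c.1 + c.2 < e + fuel ∧ pvQ b a1 a2 c.1 c.2 = true ∧
           ∀ l w, 0 ≤ l → 0 ≤ w → e ≤ l + w → l + w < e + fuel → pvQ b a1 a2 l w = true → pvKeyLe c (l, w)))) := by
  intro fuel
  induction fuel with
  | zero =>
      intro e he
      constructor
      · simp [pvCellE]; omega
      · intro c h; simp [pvCellE] at h
  | succ f ih =>
      intro e he
      have hcast : (((e + 1).toNat : Nat) : Int) = e + 1 := Int.toNat_of_nonneg (by omega)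
      obtain ⟨wnone, wsome⟩ := pvCellW_char b a1 a2 e ((e + 1).toNat) 0
      rw [hcast] at wnone wsome
      -- cells on diagonal e are exactly (e - w, w) for 0 ≤ w ≤ e
      have hdiag : (∀ w, 0 ≤ w → w < 0 + (e + 1) → ¬ pvQ b a1 a2 (e - w) w = true) ↔
          (∀ l w, 0 ≤ l → 0 ≤ w → l + w = e → ¬ pvQ b a1 a2 l w = true) := by
        constructor
        · intro h l w hl hw hs
          have : l = e - w := by omega
          subst this
          exact h w hw (by omega)
        · intro h w hw1 hw2
          exact h (e - w) w (by omega) hw1 (by omega)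
      constructor
      · simp only [pvCellE]
        cases hW : pvCellW b a1 a2 e 0 ((e + 1).toNat) with
        | some c =>
            obtain ⟨w, hw1, hw2, hc, hQ, _⟩ := wsome c hW
            constructor
            · intro hh; exact absurd hh (by simp)
            · intro hall
              exact absurd hQ (hall (e - w) w (by omega) hw1 (by omega) (by omega))
        | none =>
            have hdnone := hdiag.mp (wnone.mp hW)
            rw [(ih (e + 1) (by omega)).1]
            constructor
            · intro h l w hl hw hs1 hs2
              rcases eq_or_lt_of_le hs1 with heq | hlt
              · exact hdnone l w hl hw heq.symm
              · exact h l w hl hw (by omega) (by omega)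
            · intro h l w hl hw hs1 hs2
              exact h l w hl hw (by omega) (by push_cast at hs2 ⊢; omega)
      · intro c
        simp only [pvCellE]
        cases hW : pvCellW b a1 a2 e 0 ((e + 1).toNat) with
        | some c' =>
            intro h
            have hc : c' = c := by simpa using h
            subst hc
            obtain ⟨w, hw1, hw2, hc, hQ, hmin⟩ := wsome c' hW
            subst hc
            refine ⟨by omega, by omega, by omega, by push_cast; omega, hQ, ?_⟩
            intro l w' hl hw' hs1 hs2 hQ'
            rcases eq_or_lt_of_le hs1 with heq | hlt
            · -- same diagonal: w' ≥ w by minimality of w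
              by_cases hww : w' < w
              · have hlw : l = e - w' := by omega
                subst hlw
                exact absurd hQ' (hmin w' hw' hww)
              · simp only [pvKeyLe]; omega
            · simp only [pvKeyLe]; omega
        | none =>
            intro h
            have hdnone := hdiag.mp (wnone.mp hW)
            obtain ⟨h1, h2, h3, h4, h5, h6⟩ := (ih (e + 1) (by omega)).2 c h
            refine ⟨h1, h2, by omega, by push_cast at h4 ⊢; omega, h5, ?_⟩
            intro l w hl hw hs1 hs2 hQ'
            rcases eq_or_lt_of_le hs1 with heq | hlt
            · exact absurd hQ' (hdnone l w hl hw heq.symm)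
            · exact h6 l w hl hw (by omega) (by push_cast at hs2 ⊢; omega) hQ'

-- ---- characterization of B's row scan ----
theorem pvRowScanB_char (b : List String) (a1 a2 w : Int) :
    ∀ (fuel : Nat) (l0 : Int),
      ((pvRowScanB b a1 a2 w l0 fuel = none ↔ ∀ l, l0 ≤ l → l < l0 + fuel → ¬ pvQ b a1 a2 l w = true) ∧
       (∀ l, pvRowScanB b a1 a2 w l0 fuel = some l →
          l0 ≤ l ∧ l < l0 + fuel ∧ pvQ b a1 a2 l w = true ∧ ∀ l', l0 ≤ l' → l' < l → ¬ pvQ b a1 a2 l' w = true)) := by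
  intro fuel
  induction fuel with
  | zero =>
      intro l0
      constructor
      · simp [pvRowScanB]; omega
      · intro l h; simp [pvRowScanB] at h
  | succ f ih =>
      intro l0
      have hql : ∀ l : Int, pvOccursOnceB b (PySem.List.slice b (some (a1 - l)) (some (a2 + w))) = pvQ b a1 a2 l w := by
        intro l; rw [pvQ, pvUnique_eq]
      constructor
      · simp only [pvRowScanB, hql]
        split
        · rename_i hq
          constructor
          · intro h; exact absurd h (by simp)
          · intro h; exact absurd hq (h l0 le_rfl (by omega))
        · rename_i hq
          rw [(ih (l0 + 1)).1]
          constructor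
          · intro h l hl1 hl2
            rcases eq_or_lt_of_le hl1 with he | hlt
            · subst he; simpa using hq
            · exact h l (by omega) (by omega)
          · intro h l hl1 hl2; exact h l (by omega) (by omega)
      · intro l
        simp only [pvRowScanB, hql]
        split
        · rename_i hq
          intro h
          have : l0 = l := by simpa using h
          subst this
          exact ⟨le_rfl, by omega, hq, by omega⟩
        · rename_i hq
          intro h
          obtain ⟨hl1, hl2, hQ, hmin⟩ := (ih (l0 + 1)).2 l h
          refine ⟨by omega, by omega, hQ, ?_⟩
          intro l' hl1' hl2'
          rcases eq_or_lt_of_le hl1' with he | hlt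
          · subst he; simpa using hq
          · exact hmin l' (by omega) hl2'

-- invariant carried by B's outer loop
def pvInv (b : List String) (a1 a2 E w : Int) (best : Option (Int × Int)) : Prop :=
  match best with
  | none => ∀ l w', 0 ≤ l → 0 ≤ w' → w' < w → l + w' ≤ E → ¬ pvQ b a1 a2 l w' = true
  | some c => pvHit b a1 a2 E c.1 c.2 ∧ c.2 < w ∧
      ∀ l w', 0 ≤ l → 0 ≤ w' → w' < w → l + w' ≤ E → pvQ b a1 a2 l w' = true → pvKeyLe c (l, w')

theorem pvRowsB_step (b : List String) (a1 a2 E w : Int) (best : Option (Int × Int))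
    (hw : 0 ≤ w) (hinv : pvInv b a1 a2 E w best) :
    pvInv b a1 a2 E (w + 1)
      (match pvRowScanB b a1 a2 w 0
          (((match best with | none => E - w | some q => min (E - w) (q.1 + q.2 - w - 1)) + 1).toNat) with
       | some l => some (l, w)
       | none => best) := by
  cases best with
  | none =>
      simp only [pvInv] at hinv
      obtain ⟨snone, ssome⟩ := pvRowScanB_char b a1 a2 w ((E - w + 1).toNat) 0
      cases hscan : pvRowScanB b a1 a2 w 0 ((E - w + 1).toNat) with
      | some l =>
          obtain ⟨hl0, hlt, hQ, hmin⟩ := ssome l hscan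
          have hfuel : 0 < (E - w + 1).toNat := by
            by_contra hf
            have : (E - w + 1).toNat = 0 := by omega
            rw [this] at hscan; simp [pvRowScanB] at hscan
          have hcast : (((E - w + 1).toNat : Nat) : Int) = E - w + 1 := Int.toNat_of_nonneg (by omega)
          simp only [pvInv]
          refine ⟨⟨hl0, hw, by omega, hQ⟩, by omega, ?_⟩
          intro l' w' hl' hw' hw'lt hgrid hQ'
          rcases (by omega : w' < w ∨ w = w') with hlt' | heq
          · exact absurd hQ' (hinv l' w' hl' hw' hlt' hgrid)
          · subst heq
            by_cases hll : l' < l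
            · exact absurd hQ' (hmin l' hl' hll)
            · simp only [pvKeyLe]; omega
      | none =>
          simp only [pvInv]
          intro l' w' hl' hw' hw'lt hgrid
          rcases (by omega : w' < w ∨ w = w') with hlt' | heq
          · exact hinv l' w' hl' hw' hlt' hgrid
          · subst heq
            by_cases hE : 0 ≤ E - w
            · have hcast : (((E - w + 1).toNat : Nat) : Int) = E - w + 1 := Int.toNat_of_nonneg (by omega)
              exact snone.mp hscan l' hl' (by omega)
            · omega
  | some c =>
      simp only [pvInv] at hinv
      obtain ⟨⟨hc1, hc2, hcE, hcQ⟩, hcw, hkey⟩ := hinv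
      obtain ⟨snone, ssome⟩ := pvRowScanB_char b a1 a2 w ((min (E - w) (c.1 + c.2 - w - 1) + 1).toNat) 0
      cases hscan : pvRowScanB b a1 a2 w 0 ((min (E - w) (c.1 + c.2 - w - 1) + 1).toNat) with
      | some l =>
          obtain ⟨hl0, hlt, hQ, hmin⟩ := ssome l hscan
          have hfuel : 0 < (min (E - w) (c.1 + c.2 - w - 1) + 1).toNat := by
            by_contra hf
            have : (min (E - w) (c.1 + c.2 - w - 1) + 1).toNat = 0 := by omega
            rw [this] at hscan; simp [pvRowScanB] at hscan
          have hcast : (((min (E - w) (c.1 + c.2 - w - 1) + 1).toNat : Nat) : Int) =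
              min (E - w) (c.1 + c.2 - w - 1) + 1 := Int.toNat_of_nonneg (by omega)
          have hlcap : l ≤ min (E - w) (c.1 + c.2 - w - 1) := by omega
          simp only [pvInv]
          refine ⟨⟨hl0, hw, by omega, hQ⟩, by omega, ?_⟩
          intro l' w' hl' hw' hw'lt hgrid hQ'
          rcases (by omega : w' < w ∨ w = w') with hlt' | heq
          · have := hkey l' w' hl' hw' hlt' hgrid hQ'
            simp only [pvKeyLe] at this ⊢; omega
          · subst heq
            by_cases hll : l' < l
            · exact absurd hQ' (hmin l' hl' hll)
            · simp only [pvKeyLe]; omega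
      | none =>
          simp only [pvInv]
          refine ⟨⟨hc1, hc2, hcE, hcQ⟩, by omega, ?_⟩
          intro l' w' hl' hw' hw'lt hgrid hQ'
          rcases (by omega : w' < w ∨ w = w') with hlt' | heq
          · exact hkey l' w' hl' hw' hlt' hgrid hQ'
          · subst heq
            by_cases hcap : l' ≤ min (E - w) (c.1 + c.2 - w - 1)
            · have hcast : (((min (E - w) (c.1 + c.2 - w - 1) + 1).toNat : Nat) : Int) =
                  min (E - w) (c.1 + c.2 - w - 1) + 1 := Int.toNat_of_nonneg (by omega)
              exact absurd hQ' (snone.mp hscan l' hl' (by omega))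
            · -- l' beyond the cutoff: its key cannot beat c
              simp only [pvKeyLe]; omega

theorem pvRowsB_inv (b : List String) (a1 a2 E : Int) :
    ∀ (fuel : Nat) (w : Int) (best : Option (Int × Int)), 0 ≤ w → pvInv b a1 a2 E w best →
      pvInv b a1 a2 E (w + fuel) (pvRowsB b a1 a2 E w best fuel) := by
  intro fuel
  induction fuel with
  | zero => intro w best hw hinv; simpa [pvRowsB] using hinv
  | succ f ih =>
      intro w best hw hinv
      have hcast : w + ((f + 1 : Nat) : Int) = (w + 1) + (f : Int) := by push_cast; ring
      simp only [pvRowsB]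
      rw [hcast]
      exact ih (w + 1) _ (by omega) (pvRowsB_step b a1 a2 E w best hw hinv)

-- ---- the per-change results agree ----
theorem pvFind_eq (b : List String) (a1 a2 : Int) :
    pvFindUniqueA b a1 a2 = pvMinUniqueExpB b a1 a2 := by
  rw [pvFindUniqueA, pvMinUniqueExpB]
  cases hbl : pvBlank b with
  | true => simp
  | false =>
      simp only [Bool.false_eq_true, if_false]
      have hcell : pvCellE b a1 a2 0 ((PySem.List.len b - a2 + a1 + 1).toNat) =
          pvRowsB b a1 a2 (PySem.List.len b - a2 + a1) 0 none ((PySem.List.len b - a2 + a1 + 1).toNat) := by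
        set E := PySem.List.len b - a2 + a1 with hE
        by_cases hEneg : E + 1 ≤ 0
        · rw [show (E + 1).toNat = 0 from by omega]
          simp [pvCellE, pvRowsB]
        · obtain ⟨cnone, csome⟩ := pvCellE_char b a1 a2 ((E + 1).toNat) 0 le_rfl
          have hinv := pvRowsB_inv b a1 a2 E ((E + 1).toNat) 0 none le_rfl
            (by simp only [pvInv]; intro l w' _ hw' hlt _ _; omega)
          cases hD : pvCellE b a1 a2 0 ((E + 1).toNat) with
          | none =>
              cases hRv : pvRowsB b a1 a2 E 0 none ((E + 1).toNat) with
              | none => rfl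
              | some c =>
                  rw [hRv] at hinv
                  simp only [pvInv, pvHit] at hinv
                  obtain ⟨⟨h1, h2, h3, h4⟩, _, _⟩ := hinv
                  exact absurd h4 (cnone.mp hD c.1 c.2 h1 h2 (by omega) (by omega))
          | some c =>
              obtain ⟨d1, d2, d3, d4, d5, d6⟩ := csome c hD
              cases hRv : pvRowsB b a1 a2 E 0 none ((E + 1).toNat) with
              | none =>
                  rw [hRv] at hinv
                  simp only [pvInv] at hinv
                  exact absurd d5 (hinv c.1 c.2 d1 d2 (by omega) (by omega))
              | some c' =>
                  rw [hRv] at hinv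
                  simp only [pvInv, pvHit] at hinv
                  obtain ⟨⟨e1, e2, e3, e4⟩, _, ekey⟩ := hinv
                  have k1 : pvKeyLe c (c'.1, c'.2) := d6 c'.1 c'.2 e1 e2 (by omega) (by omega) e4
                  have k2 : pvKeyLe c' (c.1, c.2) := ekey c.1 c.2 d1 d2 (by omega) (by omega) d5
                  cases c with
                  | mk cl cw =>
                      cases c' with
                      | mk cl' cw' =>
                          simp only [pvKeyLe] at k1 k2
                          have hco : cl = cl' ∧ cw = cw' := by omega
                          rw [hco.1, hco.2]
      rw [pvExtLoopA_eq b a1 a2 ((PySem.List.len b - a2 + a1 + 1).toNat) 0, hcell]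
      cases pvRowsB b a1 a2 (PySem.List.len b - a2 + a1) 0 none ((PySem.List.len b - a2 + a1 + 1).toNat) with
      | none => simp
      | some q => simp [pvV]

-- ---- the outer loops agree (cache invariant) ----
theorem pvFold_eq (lines1 : List String) :
    ∀ (cs : List ((Int × Int) × (Int × Int))) (acc : List ((Int × Int) × (Int × Int)))
      (cache : PySem.Dict (Int × Int) (Int × Int)),
      (∀ k v, PySem.Dict.get? cache k = some v → v = pvMinUniqueExpB lines1 k.1 k.2) →
      cs.foldl (fun acc c =>
          let lr := pvFindUniqueA lines1 c.1.1 c.1.2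
          acc ++ [((c.1.1 - lr.1, c.1.2 + lr.2), (c.2.1 - lr.1, c.2.2 + lr.2))]) acc =
      (cs.foldl (fun st c =>
          let key := (c.1.1, c.1.2)
          let lr := match PySem.Dict.get? st.1 key with
            | some v => v
            | none => pvMinUniqueExpB lines1 key.1 key.2
          let cache := match PySem.Dict.get? st.1 key with
            | some _ => st.1
            | none => PySem.Dict.insert st.1 key lr
          (cache, st.2 ++ [((c.1.1 - lr.1, c.1.2 + lr.2), (c.2.1 - lr.1, c.2.2 + lr.2))]))
        (cache, acc)).2 := by
  intro cs
  induction cs with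
  | nil => intro acc cache _; simp
  | cons c cs ih =>
      intro acc cache hinv
      simp only [List.foldl_cons]
      cases hg : PySem.Dict.get? cache (c.1.1, c.1.2) with
      | some v =>
          have hv : v = pvMinUniqueExpB lines1 c.1.1 c.1.2 := hinv _ v hg
          rw [pvFind_eq lines1 c.1.1 c.1.2, ← hv]
          exact ih _ cache hinv
      | none =>
          rw [pvFind_eq lines1 c.1.1 c.1.2]
          refine ih _ _ ?_
          intro k v hk
          rw [PySem.Dict.get?_insert] at hk
          split at hk
          · rename_i hkey
            subst hkey
            simpa using hk.symm
          · exact hinv k v hk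

-- ===== VERDICT (by name: the statement is the Claim_ definition above) =====
theorem unique_changes_spec : Claim_equal_unique_changes := by
  intro changes_lines lines1 _ _
  unfold Spec_unique_changes unique_changes unique_changes_alt
  exact pvFold_eq lines1 changes_lines [] PySem.Dict.empty (by intro k v h; simp [PySem.Dict.empty, PySem.Dict.get?] at h)
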